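-- pv_equiv track=rewrite | github.com/costa-group/EthIR | ethir/symExec.py | update_scc_unary
-- ===== SOURCE A (Python) =====
-- def update_scc_unary(scc_unary, blocks):
--     blocks_ids = blocks.keys()
--     new_scc_unary = []
--     for e in scc_unary:
--         if e not in blocks_ids:
--             l = list(filter(lambda x: str(x).startswith(str(e)), blocks))
--             new_scc_unary += l
--         else:
--             new_scc_unary.append(e)
--     return new_scc_unary
-- ===== SOURCE B (Python) =====
-- def _prefixes(s):
--     p = ""
--     res = []
--     for ch in s:
--         p += ch
--         res.append(p)
--     return res
--
--
-- def update_scc_unary(scc_unary, blocks):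
--     # Index every block key under each nonempty prefix of its decimal string,
--     # then answer each scc entry with one dictionary lookup.
--     index = {}
--     for k in blocks:
--         for p in _prefixes(str(k)):
--             index[p] = index.get(p, []) + [k]
--     out = []
--     for e in scc_unary:
--         if e in blocks:
--             out.append(e)
--         else:
--             out.extend(index.get(str(e), []))
--     return out
-- ===== Notes on version B (the rewrite author's own statement) =====
-- stated objective: faster
-- what changed: Instead of rescanning all block keys for every scc entry, B builds a dictionary from every nonempty decimal-string prefix of each block key to the keys carrying it, so each entry is answered by one hash lookup.
import Mathlib
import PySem

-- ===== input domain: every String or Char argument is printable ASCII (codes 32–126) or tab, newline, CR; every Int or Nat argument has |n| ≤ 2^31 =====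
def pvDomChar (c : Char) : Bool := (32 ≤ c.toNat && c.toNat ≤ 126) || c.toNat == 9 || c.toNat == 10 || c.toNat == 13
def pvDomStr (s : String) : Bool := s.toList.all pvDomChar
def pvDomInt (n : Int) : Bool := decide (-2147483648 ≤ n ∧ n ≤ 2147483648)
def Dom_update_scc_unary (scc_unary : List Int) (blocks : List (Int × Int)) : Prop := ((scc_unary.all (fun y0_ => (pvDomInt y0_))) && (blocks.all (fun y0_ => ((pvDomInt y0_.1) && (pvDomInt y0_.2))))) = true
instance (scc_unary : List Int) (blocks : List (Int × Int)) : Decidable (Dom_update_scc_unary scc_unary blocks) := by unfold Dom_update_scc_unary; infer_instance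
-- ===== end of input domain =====

-- B replaces A's per-entry scan over all block keys by a dictionary built once
-- from every nonempty decimal-string prefix of each block key (objective: faster).

-- ===== PORT A =====
def update_scc_unary (scc_unary : List Int) (blocks : List (Int × Int)) : List Int :=
  let blocks_ids := (PySem.Dict.mk blocks).keys
  scc_unary.foldl
    (fun new_scc e =>
      if e ∉ blocks_ids then
        new_scc ++ blocks_ids.filter
          (fun x => PySem.Str.startswith (PySem.Int.toStr x) (PySem.Int.toStr e))
      else
        new_scc ++ [e])
    []

-- ===== PORT B =====
-- port of Source B's _prefixes: the nonempty prefixes of a string, grown character by character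
def pvPrefixes (s : List Char) : List (List Char) :=
  (s.foldl (fun (st : List Char × List (List Char)) ch =>
      (st.1 ++ [ch], st.2 ++ [st.1 ++ [ch]])) ([], [])).2

def update_scc_unary_alt (scc_unary : List Int) (blocks : List (Int × Int)) : List Int :=
  let bd := PySem.Dict.mk blocks
  let index := bd.keys.foldl
    (fun d k => (pvPrefixes (PySem.Int.toChars k)).foldl
        (fun d p => d.modify p [] (fun l => l ++ [k])) d)
    PySem.Dict.empty
  scc_unary.foldl
    (fun out e =>
      if bd.contains e then out ++ [e]
      else out ++ index.getD (PySem.Int.toChars e) [])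
    []

-- ===== PRECONDITION & SPEC =====
def Spec_update_scc_unary (scc_unary : List Int) (blocks : List (Int × Int)) (out : List Int) : Prop := out = update_scc_unary_alt scc_unary blocks
instance (scc_unary : List Int) (blocks : List (Int × Int)) (out : List Int) : Decidable (Spec_update_scc_unary scc_unary blocks out) := by unfold Spec_update_scc_unary; infer_instance

-- ===== CLAIM (what is proved, stated in full; the proofs are below) =====
def Claim_equal_update_scc_unary : Prop := ∀ (scc_unary : List Int) (blocks : List (Int × Int)), Dom_update_scc_unary scc_unary blocks → Spec_update_scc_unary scc_unary blocks (update_scc_unary scc_unary blocks)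

-- ===== LEMMAS AND PROOFS =====

theorem pvPrefixes_foldl (s : List Char) : ∀ (p : List Char) (acc : List (List Char)),
    (s.foldl (fun (st : List Char × List (List Char)) ch =>
      (st.1 ++ [ch], st.2 ++ [st.1 ++ [ch]])) (p, acc)).2
    = acc ++ (List.range s.length).map (fun i => p ++ s.take (i+1)) := by
  induction s with
  | nil => intro p acc; simp
  | cons c s ih =>
    intro p acc
    simp only [List.foldl_cons, ih, List.length_cons, List.range_succ_eq_map,
      List.map_cons, List.map_map]
    simp [Function.comp, List.append_assoc]

theorem pvPrefixes_eq (s : List Char) :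
    pvPrefixes s = (List.range s.length).map (fun i => s.take (i+1)) := by
  unfold pvPrefixes
  rw [pvPrefixes_foldl]
  simp

theorem mem_pvPrefixes (s q : List Char) :
    q ∈ pvPrefixes s ↔ q ≠ [] ∧ q <+: s := by
  rw [pvPrefixes_eq]
  simp only [List.mem_map, List.mem_range]
  constructor
  · rintro ⟨i, hi, rfl⟩
    constructor
    · apply List.ne_nil_of_length_pos
      simp [List.length_take]; omega
    · exact List.take_prefix _ _
  · rintro ⟨hne, hpre⟩
    refine ⟨q.length - 1, ?_, ?_⟩
    · have h1 := hpre.length_le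
      have h2 : 0 < q.length := List.length_pos_of_ne_nil hne
      omega
    · have h2 : 0 < q.length := List.length_pos_of_ne_nil hne
      have : q.length - 1 + 1 = q.length := by omega
      rw [this, ← List.prefix_iff_eq_take.mp hpre]

theorem nodup_pvPrefixes (s : List Char) : (pvPrefixes s).Nodup := by
  rw [pvPrefixes_eq]
  refine List.Nodup.map_on ?_ (List.nodup_range)
  intro i hi j hj h
  simp only [List.mem_range] at hi hj
  have hli : (s.take (i+1)).length = i + 1 := by
    rw [List.length_take]; omega
  have hlj : (s.take (j+1)).length = j + 1 := by
    rw [List.length_take]; omega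
  have := congrArg List.length h
  omega

theorem toChars_core_len (b : Nat) : ∀ (f n : Nat) (acc : List Char),
    acc.length ≤ (Nat.toDigitsCore b f n acc).length := by
  intro f
  induction f with
  | zero => intro n acc; simp [Nat.toDigitsCore]
  | succ f ih =>
    intro n acc
    simp only [Nat.toDigitsCore]
    split
    · simp
    · calc acc.length ≤ (Nat.digitChar (n % b) :: acc).length := by simp
        _ ≤ _ := ih _ _

theorem toDigits_ne_nil (b n : Nat) : Nat.toDigits b n ≠ [] := by
  apply List.ne_nil_of_length_pos
  unfold Nat.toDigits
  simp only [Nat.toDigitsCore]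
  split
  · simp
  · have := toChars_core_len b n (n / b) [Nat.digitChar (n % b)]
    simp at this; omega

theorem toChars_ne_nil (n : Int) : PySem.Int.toChars n ≠ [] := by
  unfold PySem.Int.toChars
  split
  · simp
  · exact toDigits_ne_nil 10 _

theorem getD_foldl_modify_mem (k : Int) : ∀ (ps : List (List Char)), ps.Nodup →
    ∀ (d : PySem.Dict (List Char) (List Int)) (q : List Char),
    (ps.foldl (fun d p => d.modify p [] (fun l => l ++ [k])) d).getD q []
      = d.getD q [] ++ (if q ∈ ps then [k] else []) := by
  intro ps
  induction ps with
  | nil => intro _ d q; simp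
  | cons p ps ih =>
    intro hnd d q
    simp only [List.foldl_cons]
    rw [ih hnd.of_cons]
    rw [PySem.Dict.getD_modify]
    by_cases hq : q = p
    · subst hq
      have : q ∉ ps := (List.nodup_cons.mp hnd).1
      simp [this]
    · simp [hq, List.mem_cons]

theorem getD_index (ks : List Int) : ∀ (d : PySem.Dict (List Char) (List Int)) (q : List Char),
    (ks.foldl (fun d k => (pvPrefixes (PySem.Int.toChars k)).foldl
        (fun d p => d.modify p [] (fun l => l ++ [k])) d) d).getD q []
      = d.getD q [] ++ ks.filter (fun x => decide (q ∈ pvPrefixes (PySem.Int.toChars x))) := by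
  induction ks with
  | nil => intro d q; simp
  | cons k ks ih =>
    intro d q
    simp only [List.foldl_cons, List.filter_cons]
    rw [ih, getD_foldl_modify_mem k _ (nodup_pvPrefixes _)]
    by_cases h : q ∈ pvPrefixes (PySem.Int.toChars k)
    · simp [h, List.append_assoc]
    · simp [h]

theorem pred_eq (e x : Int) :
    decide (PySem.Int.toChars e ∈ pvPrefixes (PySem.Int.toChars x))
      = PySem.Str.startswith (PySem.Int.toStr x) (PySem.Int.toStr e) := by
  rw [PySem.Str.startswith_eq, PySem.Int.toList_toStr, PySem.Int.toList_toStr]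
  by_cases h : PySem.Int.toChars e ∈ pvPrefixes (PySem.Int.toChars x)
  · have := (mem_pvPrefixes _ _).mp h
    simp [h, (PySem.Chars.startswith_iff _ _).mpr this.2]
  · have : ¬ (PySem.Int.toChars e <+: PySem.Int.toChars x) := by
      intro hp
      exact h ((mem_pvPrefixes _ _).mpr ⟨toChars_ne_nil e, hp⟩)
    simp only [h, decide_false]
    rcases hb : PySem.Chars.startswith (PySem.Int.toChars x) (PySem.Int.toChars e) with _ | _
    · rfl
    · exact absurd ((PySem.Chars.startswith_iff _ _).mp hb) this

-- ===== VERDICT (by name: the statement is the Claim_ definition above) =====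
theorem update_scc_unary_spec : Claim_equal_update_scc_unary := by
  intro scc blocks _
  unfold Spec_update_scc_unary update_scc_unary update_scc_unary_alt
  simp only []
  congr 1
  funext acc e
  have hc : (PySem.Dict.mk blocks).contains e = true ↔ e ∈ (PySem.Dict.mk blocks).keys :=
    PySem.Dict.contains_iff_mem_keys _ _
  by_cases he : e ∈ (PySem.Dict.mk blocks).keys
  · rw [if_neg (not_not_intro he), if_pos (hc.mpr he)]
  · rw [if_pos he, if_neg (fun hcc => he (hc.mp hcc))]
    congr 1
    rw [getD_index _ PySem.Dict.empty (PySem.Int.toChars e)]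
    rw [PySem.Dict.getD_empty]
    simp only [List.nil_append]
    apply List.filter_congr
    intro x _
    exact (pred_eq e x).symm
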